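-- pv_equiv track=rewrite | github.com/eastmountyxz/SystemSecurity-ReverseAnalysis | 18.BAT+WinRAR/CVE-2018-20250-WinRAR/acefile.py | _format_bitfield
-- ===== SOURCE A (Python) =====
-- def _format_bitfield(strings, field):
--     labels = []
--     for i in range(field.bit_length()):
--         bit = 1 << i
--         if field & bit == bit:
--             try:
--                 labels.append(strings[i])
--             except IndexError:
--                 labels.append(str(bit))
--     return '|'.join(labels)
-- ===== SOURCE B (Python) =====
-- def _format_bitfield(strings, field):
--     n = field.bit_length()
--
--     def go(f, i):
--         if i == n:
--             return []
--         rest = go(f >> 1, i + 1)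
--         if f & 1:
--             return [strings[i] if i < len(strings) else str(1 << i)] + rest
--         return rest
--
--     return '|'.join(go(field, 0))
-- ===== Notes on version B (the rewrite author's own statement) =====
-- stated objective: alternative
-- what changed: B replaces A's indexed loop (masking field with 1<<i at every position and appending to an accumulator, with try/except for the label lookup) by a recursive bit-peeling helper that shifts the field right one bit per step, tests only the low bit, and builds the label list back-to-front by consing onto the recursive result, with an explicit bounds check instead of try/except.
import Mathlib
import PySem

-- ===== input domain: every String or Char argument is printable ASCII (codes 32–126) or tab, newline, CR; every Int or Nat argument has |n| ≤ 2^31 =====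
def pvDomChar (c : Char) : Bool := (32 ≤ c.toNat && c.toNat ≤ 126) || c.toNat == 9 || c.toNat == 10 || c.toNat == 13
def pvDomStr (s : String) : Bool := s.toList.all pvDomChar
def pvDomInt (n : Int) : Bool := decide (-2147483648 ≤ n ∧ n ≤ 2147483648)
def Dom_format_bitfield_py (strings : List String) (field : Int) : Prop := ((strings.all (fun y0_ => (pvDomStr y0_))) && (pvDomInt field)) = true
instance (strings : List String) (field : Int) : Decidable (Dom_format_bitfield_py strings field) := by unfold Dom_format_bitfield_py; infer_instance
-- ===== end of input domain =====

-- B replaces A's indexed masking loop (try/except, append accumulator) by a recursive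
-- bit-peeling helper (shift right, test the low bit, cons onto the recursive result).


-- Python's '1 << k' for a nonnegative shift count k (used by both ports)
def pvBit (k : Nat) : Int := (1 : Int) <<< k

-- ===== PORT A =====
-- labels = []; for i in range(field.bit_length()): bit = 1 << i; if field & bit == bit:
--   try: labels.append(strings[i]) except IndexError: labels.append(str(bit)); return '|'.join(labels)
-- (i ranges over 0 ≤ i < bit_length, so 'i.toNat' in 'bit = 1 << i' is exact)
def format_bitfield_py (strings : List String) (field : Int) : String :=
  let labels := (PySem.List.pyRange 0 ((PySem.Int.bitLength field : Nat) : Int) 1).foldl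
    (fun labels i =>
      let bit : Int := pvBit i.toNat
      if PySem.Int.band field bit = bit then
        match PySem.List.pyGet? strings i with
        | some s => labels ++ [s]
        | none   => labels ++ [PySem.Int.toStr bit]
      else labels) []
  PySem.Str.join "|" labels

-- ===== PORT B =====
-- def go(f, i): if i == n: return []; rest = go(f >> 1, i + 1);
--   if f & 1: return [strings[i] if i < len(strings) else str(1 << i)] + rest; return rest
-- (go is only called with i ≤ n, so Python's 'i == n' exit is the 'else' of 'i < n';
--  the dite guard is a totality guard for the same computation)
def pvGo (strings : List String) (n : Nat) (f : Int) (i : Nat) : List String :=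
  if _h : i < n then
    let rest := pvGo strings n (f >>> 1) (i + 1)
    if PySem.Int.band f 1 = 1 then
      (if i < strings.length then strings.getD i "" else PySem.Int.toStr (pvBit i)) :: rest
    else rest
  else []
termination_by n - i

def format_bitfield_py_alt (strings : List String) (field : Int) : String :=
  PySem.Str.join "|" (pvGo strings (PySem.Int.bitLength field) field 0)

-- ===== PRECONDITION & SPEC =====
def Spec_format_bitfield_py (strings : List String) (field : Int) (out : String) : Prop := out = format_bitfield_py_alt strings field
instance (strings : List String) (field : Int) (out : String) : Decidable (Spec_format_bitfield_py strings field out) := by unfold Spec_format_bitfield_py; infer_instance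

-- ===== CLAIM (what is proved, stated in full; the proofs are below) =====
def Claim_equal_format_bitfield_py : Prop := ∀ (strings : List String) (field : Int), Dom_format_bitfield_py strings field → Spec_format_bitfield_py strings field (format_bitfield_py strings field)

-- ===== LEMMAS AND PROOFS =====

lemma pvBit_eq (k : Nat) : pvBit k = ((2 ^ k : Nat) : Int) := by
  show Int.ofNat (1 <<< k) = _
  rw [Nat.one_shiftLeft]; rfl

lemma pv_shr_succ (f : Int) (i : Nat) : f >>> (i + 1) = (f >>> i) >>> 1 := by
  cases f with
  | ofNat n => show Int.ofNat (n >>> (i+1)) = Int.ofNat ((n >>> i) >>> 1); rw [Nat.shiftRight_add]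
  | negSucc m => show Int.negSucc (m >>> (i+1)) = Int.negSucc ((m >>> i) >>> 1); rw [Nat.shiftRight_add]

-- PySem.Int.band of a negative Int with a natural number, in closed Nat form
lemma pv_band_negSucc (m b : Nat) :
    PySem.Int.band (Int.negSucc m) ((b : Nat) : Int) = ((b - (b &&& m) : Nat) : Int) := by
  unfold PySem.Int.band
  rw [if_neg (Int.negSucc_not_nonneg m).mp, if_pos (Int.natCast_nonneg b)]
  simp [Int.negSucc_eq]

lemma pv_tb (x i : Nat) : x.testBit i = decide ((x >>> i) % 2 = 1) := by
  have h := Nat.testBit_shiftRight (i := i) (j := 0) x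
  simp only [Nat.add_zero] at h
  rw [← h, Nat.testBit_zero]

-- A's per-position mask test equals B's low-bit test on the shifted field
lemma pv_key (f : Int) (i : Nat) :
    (PySem.Int.band f (pvBit i) = pvBit i) ↔ PySem.Int.band (f >>> i) 1 = 1 := by
  rw [pvBit_eq]
  have hpos : 0 < 2 ^ i := Nat.two_pow_pos i
  cases f with
  | ofNat n =>
    have h0 : (Int.ofNat n) >>> i = Int.ofNat (n >>> i) := rfl
    have h1 : PySem.Int.band (Int.ofNat n) ((2 ^ i : Nat) : Int) = ((n &&& 2 ^ i : Nat) : Int) :=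
      PySem.Int.band_natCast n (2 ^ i)
    have h2 : PySem.Int.band (Int.ofNat (n >>> i)) 1 = (((n >>> i) &&& 1 : Nat) : Int) := by
      exact_mod_cast PySem.Int.band_natCast (n >>> i) 1
    rw [h0, h1, h2]
    have e1 : n &&& 2 ^ i = (n.testBit i).toNat * 2 ^ i := Nat.and_two_pow n i
    have e2 : (n >>> i) &&& 1 = (n >>> i) % 2 := Nat.and_one_is_mod _
    rw [e1, e2, pv_tb]
    rcases Nat.mod_two_eq_zero_or_one (n >>> i) with h | h <;> rw [h] <;> simp <;>
      exact fun hc => (pow_ne_zero i two_ne_zero) hc.symm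
  | negSucc m =>
    have h0 : (Int.negSucc m) >>> i = Int.negSucc (m >>> i) := rfl
    have h2 : PySem.Int.band (Int.negSucc (m >>> i)) 1 = ((1 - (1 &&& (m >>> i)) : Nat) : Int) := by
      exact_mod_cast pv_band_negSucc (m >>> i) 1
    rw [h0, pv_band_negSucc, h2]
    have e1 : 2 ^ i &&& m = 2 ^ i * (m.testBit i).toNat := Nat.two_pow_and m i
    have e2 : 1 &&& (m >>> i) = (m >>> i) % 2 := by rw [Nat.and_comm]; exact Nat.and_one_is_mod _
    rw [e1, e2, pv_tb]
    rcases Nat.mod_two_eq_zero_or_one (m >>> i) with h | h <;> rw [h] <;> simp <;>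
      exact fun hc => (pow_ne_zero i two_ne_zero) hc.symm

-- A's try/except label equals B's bounds-checked label
lemma pv_label (strings acc : List String) (i : Nat) :
    (match PySem.List.pyGet? strings ((i : Nat) : Int) with
      | some s => acc ++ [s]
      | none   => acc ++ [PySem.Int.toStr (pvBit i)])
    = acc ++ [if i < strings.length then strings.getD i "" else PySem.Int.toStr (pvBit i)] := by
  rw [PySem.List.pyGet?_natCast]
  by_cases hl : i < strings.length
  · rw [List.getElem?_eq_getElem hl]
    simp [hl]
  · rw [List.getElem?_eq_none (by omega)]
    simp [hl]

-- A's fold from position i onward appends exactly B's recursion on the shifted field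
lemma pv_main (strings : List String) (field : Int) (n : Nat) :
    ∀ (k i : Nat), i + k = n → ∀ (acc : List String),
      (PySem.List.pyRange ((i : Nat) : Int) ((n : Nat) : Int) 1).foldl
        (fun labels j =>
          let bit : Int := pvBit j.toNat
          if PySem.Int.band field bit = bit then
            match PySem.List.pyGet? strings j with
            | some s => labels ++ [s]
            | none   => labels ++ [PySem.Int.toStr bit]
          else labels) acc
      = acc ++ pvGo strings n (field >>> i) i := by
  intro k
  induction k with
  | zero =>
    intro i hi acc
    subst hi
    rw [PySem.List.pyRange_one_eq_nil (by simp), pvGo]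
    simp
  | succ k ih =>
    intro i hi acc
    have hlt : i < n := by omega
    rw [PySem.List.pyRange_one_cons (by exact_mod_cast hlt)]
    have hcast : ((i : Nat) : Int) + 1 = (((i + 1 : Nat)) : Int) := by push_cast; ring
    rw [List.foldl_cons, hcast, ih (i + 1) (by omega)]
    conv_rhs => rw [pvGo]
    rw [dif_pos hlt, ← pv_shr_succ]
    have htest := pv_key (field) i
    by_cases h : PySem.Int.band (field >>> i) 1 = 1
    · have hA : PySem.Int.band field (pvBit i) = pvBit i := htest.mpr h
      rw [if_pos h]
      simp only [Int.toNat_natCast, if_pos hA, pv_label strings acc i]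
      simp
    · have hA : ¬ (PySem.Int.band field (pvBit i) = pvBit i) := fun hc => h (htest.mp hc)
      rw [if_neg h]
      simp only [Int.toNat_natCast, if_neg hA]

-- ===== VERDICT (by name: the statement is the Claim_ definition above) =====
theorem format_bitfield_py_spec : Claim_equal_format_bitfield_py := by
  intro strings field _
  show format_bitfield_py strings field = format_bitfield_py_alt strings field
  unfold format_bitfield_py format_bitfield_py_alt
  have h := pv_main strings field (PySem.Int.bitLength field) (PySem.Int.bitLength field) 0 (by omega) []
  rw [Int.shiftRight_zero] at h
  simp only [Nat.cast_zero] at h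
  rw [h]
  simp
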